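-- pv_equiv track=rewrite | github.com/ggcameronnogg/RAG_Galaxy_Workflow_POC1 | barcode_splitter/Barcode Splitter.py | match_barcode_at_5prime
-- ===== SOURCE A (Python) =====
-- from typing import List, Tuple, Optional, Dict, Iterable
--
-- def match_barcode_at_5prime(read_seq: str, barcode: str, max_mismatches: int, max_deletions: int) -> Optional[Tuple[int, int]]:
--     B = len(barcode)
--     R = len(read_seq)
--     INF = (10**9, 10**9)
--     DP = [[INF]*(R+1) for _ in range(B+1)]
--     DP[0][0] = (0, 0)
--     for i in range(B):
--         for j in range(R+1):
--             mm, dd = DP[i][j]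
--             if mm == 10**9:
--                 continue
--             if dd + 1 <= max_deletions:
--                 if DP[i+1][j] > (mm, dd+1):
--                     DP[i+1][j] = (mm, dd+1)
--             if j < R:
--                 add_mis = 0 if barcode[i] == read_seq[j] else 1
--                 if mm + add_mis <= max_mismatches:
--                     cand = (mm + add_mis, dd)
--                     if DP[i+1][j+1] > cand:
--                         DP[i+1][j+1] = cand
--     best = None
--     for j in range(R+1):
--         mm, dd = DP[B][j]
--         if mm <= max_mismatches and dd <= max_deletions:
--             if best is None or (mm, dd, j) < (best[1], best[2], best[0]):
--                 best = (j, mm, dd)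
--     if best is None:
--         return None
--     used_read_len, mm, _dd = best
--     return used_read_len, mm
-- ===== SOURCE B (Python) =====
-- def match_barcode_at_5prime(read_seq, barcode, max_mismatches, max_deletions):
--     # Banded DP: in any alignment of barcode[:i] against read[:j] the number of
--     # deletions is exactly i - j, so only j in [i - max_deletions, min(i, R)] is
--     # feasible; keep one Optional[int] (minimal mismatches) per band cell.
--     Bn = len(barcode)
--     R = len(read_seq)
--     if max_mismatches < 0 or max_deletions < 0:
--         return None
--     lo = 0
--     row = [0]          # row[k] = minimal mismatches for j = lo + k, or None
--     for i in range(Bn):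
--         nlo = max(0, i + 1 - max_deletions)
--         nhi = min(i + 1, R)
--         new = []
--         for k in range(nhi + 1 - nlo):
--             j = nlo + k
--             cand = None
--             if lo <= j < lo + len(row):          # delete barcode[i]
--                 cand = row[j - lo]
--             if lo <= j - 1 < lo + len(row) and row[j - 1 - lo] is not None:
--                 c = row[j - 1 - lo] + (0 if barcode[i] == read_seq[j - 1] else 1)
--                 if c <= max_mismatches and (cand is None or c < cand):
--                     cand = c
--             new.append(cand)
--         lo, row = nlo, new
--     best = None        # (mismatches, j): minimal mismatches, then longest prefix
--     for k in range(len(row)):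
--         v = row[k]
--         if v is not None:
--             if best is None or v < best[0] or (v == best[0] and lo + k > best[1]):
--                 best = (v, lo + k)
--     return None if best is None else (best[1], best[0])
-- ===== Notes on version B (the rewrite author's own statement) =====
-- stated objective: faster
-- what changed: Replaces the full (B+1)x(R+1) push-update table of (mismatch,deletion) tuples by a banded pull-style DP: since an alignment of barcode[:i] to read[:j] uses exactly i-j deletions, only j in [i-max_deletions, min(i,R)] is feasible, so B keeps one Optional mismatch count per cell of that band and computes each cell directly from its two predecessors.
-- outside the precondition, e.g. on match_barcode_at_5prime('AC', 'AC', 2000000000, 0): A returns (2, 0), B returns (2, 0)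
import Mathlib
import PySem

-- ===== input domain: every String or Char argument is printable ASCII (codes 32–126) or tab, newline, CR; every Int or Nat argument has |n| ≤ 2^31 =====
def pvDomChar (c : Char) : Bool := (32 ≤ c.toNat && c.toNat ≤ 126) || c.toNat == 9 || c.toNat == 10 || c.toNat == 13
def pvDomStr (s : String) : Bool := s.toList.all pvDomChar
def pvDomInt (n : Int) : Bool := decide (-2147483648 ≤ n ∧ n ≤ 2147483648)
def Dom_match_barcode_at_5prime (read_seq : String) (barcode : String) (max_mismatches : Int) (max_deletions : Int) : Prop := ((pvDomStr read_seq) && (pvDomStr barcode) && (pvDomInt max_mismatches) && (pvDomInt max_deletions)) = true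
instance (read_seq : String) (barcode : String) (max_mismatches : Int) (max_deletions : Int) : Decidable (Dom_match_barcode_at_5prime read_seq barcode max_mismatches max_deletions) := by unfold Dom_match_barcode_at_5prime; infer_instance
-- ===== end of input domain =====

-- B replaces A's full (B+1)x(R+1) push-update tuple table by a banded pull-style DP
-- (deletions used = i - j forces j into [i - max_deletions, min(i, R)]); return values agree everywhere.

-- ===== PORT A =====
-- helpers for port A: Python's tuple "<" on pairs/triples of ints, the INF sentinel,
-- the inner-loop body and the selection-loop body, each a step-for-step transliteration.
def pvINF : Int × Int := (1000000000, 1000000000)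

def pvLtPair (a b : Int × Int) : Bool := a.1 < b.1 || (a.1 == b.1 && a.2 < b.2)

def pvLt3 (a b : Int × Int × Int) : Bool := a.1 < b.1 || (a.1 == b.1 && pvLtPair a.2 b.2)

-- body of "for j in range(R+1): ..." acting on the whole table DP (exactly A's statements)
def pvBodyA (bcs rcs : List Char) (mam mad : Int) (i : Nat)
    (DP : List (List (Int × Int))) (j : Nat) : List (List (Int × Int)) :=
  let p := (DP.getD i []).getD j pvINF
  if p.1 == 1000000000 then DP
  else
    let DP2 :=
      if p.2 + 1 ≤ mad then
        if pvLtPair (p.1, p.2 + 1) ((DP.getD (i+1) []).getD j pvINF) then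
          DP.set (i+1) ((DP.getD (i+1) []).set j (p.1, p.2 + 1))
        else DP
      else DP
    if j < rcs.length then
      let add_mis : Int := if bcs.getD i ' ' == rcs.getD j ' ' then 0 else 1
      if p.1 + add_mis ≤ mam then
        if pvLtPair (p.1 + add_mis, p.2) ((DP2.getD (i+1) []).getD (j+1) pvINF) then
          DP2.set (i+1) ((DP2.getD (i+1) []).set (j+1) (p.1 + add_mis, p.2))
        else DP2
      else DP2
    else DP2

-- body of the final "for j in range(R+1): ..." best-selection loop
def pvSelA (mam mad : Int) (row : List (Int × Int))
    (best : Option (Int × Int × Int)) (j : Nat) : Option (Int × Int × Int) :=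
  let p := row.getD j pvINF
  if p.1 ≤ mam ∧ p.2 ≤ mad then
    match best with
    | none => some ((j : Int), p.1, p.2)
    | some b => if pvLt3 (p.1, p.2, (j : Int)) (b.2.1, b.2.2, b.1) then some ((j : Int), p.1, p.2) else best
  else best

def match_barcode_at_5prime (read_seq : String) (barcode : String) (max_mismatches : Int) (max_deletions : Int) : Option (Int × Int) :=
  let bcs := barcode.toList
  let rcs := read_seq.toList
  let B := bcs.length
  let R := rcs.length
  -- DP = [[INF]*(R+1) for _ in range(B+1)]; DP[0][0] = (0, 0)
  let DP0 : List (List (Int × Int)) :=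
    (List.replicate (B+1) (List.replicate (R+1) pvINF)).set 0
      ((List.replicate (R+1) pvINF).set 0 ((0 : Int), (0 : Int)))
  let DP := (List.range B).foldl
    (fun DP i => (List.range (R+1)).foldl (pvBodyA bcs rcs max_mismatches max_deletions i) DP) DP0
  let best := (List.range (R+1)).foldl (pvSelA max_mismatches max_deletions (DP.getD B [])) none
  match best with
  | none => none
  | some (j, mm, _dd) => some (j, mm)

-- ===== PORT B =====
-- helpers for port B: the banded-row cell computation (Source B's inner-loop body: pull the
-- deletion predecessor and the match predecessor), the per-i row step, the selection body.
-- index guards 'lo ≤ j < lo+len(row)' make every list access in range, so getD/.toNat are exact.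
def pvCandB (bcs rcs : List Char) (mam : Int) (i : Nat) (lo : Int)
    (row : List (Option Int)) (j : Int) : Option Int :=
  let cand0 : Option Int :=
    if lo ≤ j ∧ j < lo + (row.length : Int) then row.getD (j - lo).toNat none else none
  if lo ≤ j - 1 ∧ j - 1 < lo + (row.length : Int) then
    match row.getD (j - 1 - lo).toNat none with
    | none => cand0
    | some v =>
      let c := v + (if bcs.getD i ' ' == rcs.getD (j - 1).toNat ' ' then (0 : Int) else 1)
      if c ≤ mam then
        match cand0 with
        | none => some c
        | some cv => if c < cv then some c else cand0
      else cand0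
  else cand0

-- one iteration of "for i in range(Bn)": build the next banded row
def pvStepB (bcs rcs : List Char) (mam mad : Int)
    (st : Int × List (Option Int)) (i : Nat) : Int × List (Option Int) :=
  let nlo : Int := max 0 ((i : Int) + 1 - mad)
  let nhi : Int := min ((i : Int) + 1) (rcs.length : Int)
  (nlo, (List.range (nhi + 1 - nlo).toNat).foldl
    (fun new (k : Nat) => new ++ [pvCandB bcs rcs mam i st.1 st.2 (nlo + (k : Int))]) [])

-- body of Source B's final "for k in range(len(row))" selection loop
def pvSelB (lo : Int) (row : List (Option Int))
    (best : Option (Int × Int)) (k : Nat) : Option (Int × Int) :=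
  match row.getD k none with
  | none => best
  | some v =>
    match best with
    | none => some (v, lo + (k : Int))
    | some b => if v < b.1 ∨ (v = b.1 ∧ lo + (k : Int) > b.2) then some (v, lo + (k : Int)) else best

def match_barcode_at_5prime_alt (read_seq : String) (barcode : String) (max_mismatches : Int) (max_deletions : Int) : Option (Int × Int) :=
  let bcs := barcode.toList
  let rcs := read_seq.toList
  let Bn := bcs.length
  if max_mismatches < 0 ∨ max_deletions < 0 then none
  else
    let st := (List.range Bn).foldl (pvStepB bcs rcs max_mismatches max_deletions) ((0 : Int), [some (0 : Int)])
    let best := (List.range st.2.length).foldl (pvSelB st.1 st.2) none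
    match best with
    | none => none
    | some (v, j) => some (j, v)

-- ===== PRECONDITION & SPEC =====
-- Pre_ excludes max_mismatches ≥ 10^9: there A's 10^9 INF sentinel is no longer larger than the
-- admissible mismatch thresholds, so sentinel cells can pass A's final filter (and on astronomically
-- long barcodes real counts could collide with the sentinel); on practical inputs in that region A
-- still returns and B agrees, but the sentinel scheme is only sound below 10^9.
def Pre_match_barcode_at_5prime (read_seq : String) (barcode : String) (max_mismatches : Int) (max_deletions : Int) : Prop :=
  max_mismatches < 1000000000
instance (read_seq : String) (barcode : String) (max_mismatches : Int) (max_deletions : Int) : Decidable (Pre_match_barcode_at_5prime read_seq barcode max_mismatches max_deletions) := by unfold Pre_match_barcode_at_5prime; infer_instance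

def pvWitness_match_barcode_at_5prime : String × String × Int × Int := ("ACGTACGT", "ACG", 1, 1)

def Spec_match_barcode_at_5prime (read_seq : String) (barcode : String) (max_mismatches : Int) (max_deletions : Int) (out : Option (Int × Int)) : Prop := out = match_barcode_at_5prime_alt read_seq barcode max_mismatches max_deletions
instance (read_seq : String) (barcode : String) (max_mismatches : Int) (max_deletions : Int) (out : Option (Int × Int)) : Decidable (Spec_match_barcode_at_5prime read_seq barcode max_mismatches max_deletions out) := by unfold Spec_match_barcode_at_5prime; infer_instance

-- ===== CLAIM (what is proved, stated in full; the proofs are below) =====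
def Claim_equal_match_barcode_at_5prime : Prop := ∀ (read_seq : String) (barcode : String) (max_mismatches : Int) (max_deletions : Int), Dom_match_barcode_at_5prime read_seq barcode max_mismatches max_deletions → Pre_match_barcode_at_5prime read_seq barcode max_mismatches max_deletions → Spec_match_barcode_at_5prime read_seq barcode max_mismatches max_deletions (match_barcode_at_5prime read_seq barcode max_mismatches max_deletions)

-- ===== LEMMAS AND PROOFS =====

-- the minimum of two optional mismatch counts
def pvMinO : Option Int → Option Int → Option Int
  | none, b => b
  | some a, none => some a
  | some a, some b => some (min a b)

def pvCost (bcs rcs : List Char) (i j : Nat) : Int :=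
  if bcs.getD i ' ' == rcs.getD j ' ' then 0 else 1

-- reference value: minimal mismatches aligning barcode[:i] against read[:j]
-- (so with exactly i-j deletions), under A's stepwise guards
def pvSpec (bcs rcs : List Char) (mam mad : Int) : Nat → Nat → Option Int
  | 0, j => if j = 0 then some 0 else none
  | i+1, j =>
      pvMinO
        (if (i : Int) - (j : Int) + 1 ≤ mad then pvSpec bcs rcs mam mad i j else none)
        (if 1 ≤ j ∧ j ≤ rcs.length then
           match pvSpec bcs rcs mam mad i (j-1) with
           | none => none
           | some m => if m + pvCost bcs rcs i (j-1) ≤ mam then some (m + pvCost bcs rcs i (j-1)) else none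
         else none)

-- the match-only candidate (what the push loop has applied to cell j before step j runs)
def pvMatO (bcs rcs : List Char) (mam mad : Int) (i j : Nat) : Option Int :=
  if 1 ≤ j ∧ j ≤ rcs.length then
    match pvSpec bcs rcs mam mad i (j-1) with
    | none => none
    | some m => if m + pvCost bcs rcs i (j-1) ≤ mam then some (m + pvCost bcs rcs i (j-1)) else none
  else none

def pvDelO (bcs rcs : List Char) (mam mad : Int) (i j : Nat) : Option Int :=
  if (i : Int) - (j : Int) + 1 ≤ mad then pvSpec bcs rcs mam mad i j else none

theorem pvSpec_succ (bcs rcs : List Char) (mam mad : Int) (i j : Nat) :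
    pvSpec bcs rcs mam mad (i+1) j =
      pvMinO (pvDelO bcs rcs mam mad i j) (pvMatO bcs rcs mam mad i j) := rfl

-- paint an optional mismatch count as the (mm, dd) pair stored in A's row i at column j
def pvToPair (i j : Nat) : Option Int → Int × Int
  | none => pvINF
  | some m => (m, (i : Int) - (j : Int))


theorem pvGetD_set_self {α : Type} (l : List α) (n : Nat) (a d : α) (h : n < l.length) :
    (l.set n a).getD n d = a := by
  simp [List.getD_eq_getElem?_getD, List.getElem?_set_self h]

theorem pvGetD_set_ne {α : Type} (l : List α) (m n : Nat) (a : α) (d : α) (h : m ≠ n) :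
    (l.set m a).getD n d = l.getD n d := by
  simp [List.getD_eq_getElem?_getD, List.getElem?_set_ne h]

theorem pvSet_getD_self {α : Type} (l : List α) (n : Nat) (d : α) (h : n < l.length) :
    l.set n (l.getD n d) = l := by
  apply List.ext_getElem?
  intro k
  by_cases hk : n = k
  · subst hk; simp [List.getElem?_set_self h, List.getD_eq_getElem?_getD]
    cases hx : l[n]? with
    | none => simp at hx; omega
    | some v => simp
  · simp [List.getElem?_set_ne hk]

theorem pvMinO_eq_some (a b : Option Int) (m : Int) (h : pvMinO a b = some m) :
    a = some m ∨ b = some m := by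
  cases a with
  | none => right; simpa [pvMinO] using h
  | some x =>
    cases b with
    | none => left; simpa [pvMinO] using h
    | some y =>
      simp [pvMinO] at h
      rcases le_total x y with hxy | hxy
      · left; simp [min_eq_left hxy] at h; simp [h]
      · right; simp [min_eq_right hxy] at h; simp [h]

theorem pvCost_bounds (bcs rcs : List Char) (i j : Nat) :
    0 ≤ pvCost bcs rcs i j ∧ pvCost bcs rcs i j ≤ 1 := by
  unfold pvCost; split <;> simp

theorem pvSpec_bounds (bcs rcs : List Char) (mam mad : Int) (i j : Nat) (m : Int)
    (h : pvSpec bcs rcs mam mad i j = some m) :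
    j ≤ i ∧ j ≤ rcs.length ∧ (i : Int) - (j : Int) ≤ max 0 mad ∧ 0 ≤ m ∧ m ≤ max 0 mam := by
  induction i generalizing j m with
  | zero =>
    unfold pvSpec at h
    split at h
    · rename_i hj; subst hj
      simp only [Option.some.injEq] at h
      refine ⟨le_refl 0, Nat.zero_le _, by simp, by omega, by have := le_max_left 0 mam; omega⟩
    · simp at h
  | succ i ih =>
    rw [pvSpec_succ] at h
    rcases pvMinO_eq_some _ _ _ h with hd | hm
    · unfold pvDelO at hd
      split at hd
      · rename_i hg
        obtain ⟨h1, h2, h3, h4, h5⟩ := ih j m hd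
        refine ⟨by omega, h2, by push_cast at hg ⊢; omega, h4, h5⟩
      · simp at hd
    · unfold pvMatO at hm
      by_cases hg : 1 ≤ j ∧ j ≤ rcs.length
      · rw [if_pos hg] at hm
        obtain ⟨hg1, hg2⟩ := hg
        cases hs : pvSpec bcs rcs mam mad i (j-1) with
        | none => rw [hs] at hm; simp at hm
        | some m0 =>
          rw [hs] at hm
          change (if m0 + pvCost bcs rcs i (j-1) ≤ mam then some (m0 + pvCost bcs rcs i (j-1)) else none) = some m at hm
          split at hm
          · rename_i hle
            simp only [Option.some.injEq] at hm
            subst hm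
            obtain ⟨h1, h2, h3, h4, h5⟩ := ih (j-1) m0 hs
            have hc := pvCost_bounds bcs rcs i (j-1)
            refine ⟨by omega, hg2, ?_, by omega, ?_⟩
            · have : ((j-1 : Nat) : Int) = (j : Int) - 1 := by omega
              omega
            · have : 0 ≤ max 0 mam := le_max_left 0 mam
              omega
          · simp at hm
      · rw [if_neg hg] at hm
        simp at hm

-- A's functional row recursion (row i of the table after the outer loop has passed i)
def pvCellA (bcs rcs : List Char) (mam mad : Int) (i : Nat)
    (prev : List (Int × Int)) (cur : List (Int × Int)) (j : Nat) : List (Int × Int) :=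
  let p := prev.getD j pvINF
  if p.1 == 1000000000 then cur
  else
    let cur2 :=
      if p.2 + 1 ≤ mad then
        if pvLtPair (p.1, p.2 + 1) (cur.getD j pvINF) then cur.set j (p.1, p.2 + 1) else cur
      else cur
    if j < rcs.length then
      let add_mis : Int := if bcs.getD i ' ' == rcs.getD j ' ' then 0 else 1
      if p.1 + add_mis ≤ mam then
        if pvLtPair (p.1 + add_mis, p.2) (cur2.getD (j+1) pvINF) then
          cur2.set (j+1) (p.1 + add_mis, p.2)
        else cur2
      else cur2
    else cur2

def pvRowA (bcs rcs : List Char) (mam mad : Int) : Nat → List (Int × Int)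
  | 0 => (List.replicate (rcs.length+1) pvINF).set 0 ((0 : Int), (0 : Int))
  | i+1 => (List.range (rcs.length+1)).foldl
      (pvCellA bcs rcs mam mad i (pvRowA bcs rcs mam mad i))
      (List.replicate (rcs.length+1) pvINF)

theorem pvCellA_length (bcs rcs : List Char) (mam mad : Int) (i : Nat)
    (prev cur : List (Int × Int)) (j : Nat) :
    (pvCellA bcs rcs mam mad i prev cur j).length = cur.length := by
  unfold pvCellA
  dsimp only
  repeat' split
  all_goals simp [List.length_set]

-- one inner-loop statement of A equals one pvCellA application to rows i, i+1
theorem pvBodyA_step (bcs rcs : List Char) (mam mad : Int) (i : Nat)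
    (DP : List (List (Int × Int))) (j : Nat) (h : i + 1 < DP.length) :
    pvBodyA bcs rcs mam mad i DP j =
      DP.set (i+1) (pvCellA bcs rcs mam mad i (DP.getD i []) (DP.getD (i+1) []) j) := by
  unfold pvBodyA pvCellA
  dsimp only
  have hset : ∀ r : List (Int × Int), (DP.set (i+1) r).getD (i+1) [] = r :=
    fun r => pvGetD_set_self _ _ _ _ h
  have hid : DP.set (i+1) (DP.getD (i+1) []) = DP := pvSet_getD_self _ _ _ h
  by_cases h1 : ((DP.getD i []).getD j pvINF).1 == 1000000000
  · rw [if_pos h1, if_pos h1, hid]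
  · rw [if_neg h1, if_neg h1]
    by_cases h2 : ((DP.getD i []).getD j pvINF).2 + 1 ≤ mad
    · rw [if_pos h2, if_pos h2]
      by_cases h3 : pvLtPair (((DP.getD i []).getD j pvINF).1, ((DP.getD i []).getD j pvINF).2 + 1)
          (((DP.getD (i+1) [])).getD j pvINF) = true
      · rw [if_pos h3, if_pos h3, hset, List.set_set]
        split_ifs <;> rfl
      · rw [if_neg h3, if_neg h3]
        split_ifs <;> first | rfl | exact hid.symm
    · rw [if_neg h2, if_neg h2]
      split_ifs <;> first | rfl | exact hid.symm

-- the 2-D fold of port A is the row recursion in disguise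
theorem pvBodyA_sim (bcs rcs : List Char) (mam mad : Int) (i : Nat)
    (L : List Nat) (DP : List (List (Int × Int))) (h : i + 1 < DP.length) :
    L.foldl (pvBodyA bcs rcs mam mad i) DP =
      DP.set (i+1) (L.foldl (pvCellA bcs rcs mam mad i (DP.getD i [])) (DP.getD (i+1) [])) := by
  induction L generalizing DP with
  | nil => exact (pvSet_getD_self _ _ _ h).symm
  | cons j L ih =>
    rw [List.foldl_cons, List.foldl_cons]
    rw [pvBodyA_step bcs rcs mam mad i DP j h]
    have hlen : (DP.set (i+1) (pvCellA bcs rcs mam mad i (DP.getD i []) (DP.getD (i+1) []) j)).length = DP.length := List.length_set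
    rw [ih _ (by rw [hlen]; exact h)]
    rw [pvGetD_set_ne _ _ _ _ _ (by omega), pvGetD_set_self _ _ _ _ (by omega), List.set_set]

-- processing column t of the push loop advances the partial-row invariant by one
theorem pvCellA_step_inv (bcs rcs : List Char) (mam mad : Int) (hmam : mam < 1000000000)
    (i t : Nat) (prev cur : List (Int × Int)) (ht : t ≤ rcs.length)
    (hlen : cur.length = rcs.length + 1)
    (hprev : ∀ j, j ≤ rcs.length → prev.getD j pvINF = pvToPair i j (pvSpec bcs rcs mam mad i j))
    (hcur : ∀ j, j ≤ rcs.length → cur.getD j pvINF =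
      if j < t then pvToPair (i+1) j (pvSpec bcs rcs mam mad (i+1) j)
      else if j = t then pvToPair (i+1) j (pvMatO bcs rcs mam mad i j) else pvINF) :
    ∀ j, j ≤ rcs.length → (pvCellA bcs rcs mam mad i prev cur t).getD j pvINF =
      if j < t+1 then pvToPair (i+1) j (pvSpec bcs rcs mam mad (i+1) j)
      else if j = t+1 then pvToPair (i+1) j (pvMatO bcs rcs mam mad i j) else pvINF := by
  intro j hj
  have hmax : max 0 mam < 1000000000 := max_lt (by norm_num) hmam
  have hp := hprev t ht
  have hcurt : cur.getD t pvINF = pvToPair (i+1) t (pvMatO bcs rcs mam mad i t) := by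
    rw [hcur t ht]; simp
  unfold pvCellA
  dsimp only
  rw [hp]
  cases hS : pvSpec bcs rcs mam mad i t with
  | none =>
    rw [show pvToPair i t none = pvINF from rfl]
    rw [if_pos (show (pvINF.1 == (1000000000 : Int)) = true from by decide)]
    rw [hcur j hj]
    rcases Nat.lt_trichotomy j t with hlt | heq | hgt
    · rw [if_pos hlt, if_pos (by omega)]
    · subst heq
      rw [if_neg (by omega), if_pos rfl, if_pos (by omega)]
      rw [pvSpec_succ]
      have : pvDelO bcs rcs mam mad i j = none := by
        unfold pvDelO; rw [hS]; split <;> rfl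
      rw [this]
      rfl
    · rw [if_neg (by omega), if_neg (by omega), if_neg (by omega)]
      by_cases hj1 : j = t+1
      · rw [if_pos hj1]
        subst hj1
        unfold pvMatO
        rw [if_pos (by omega)]
        simp only [Nat.add_sub_cancel, hS]
        rfl
      · rw [if_neg hj1]
  | some m =>
    obtain ⟨hb1, hb2, hb3, hb4, hb5⟩ := pvSpec_bounds bcs rcs mam mad i t m hS
    have hmlt : m < 1000000000 := by omega
    rw [show pvToPair i t (some m) = (m, (i:Int) - (t:Int)) from rfl]
    dsimp only
    rw [if_neg (by simp; omega)]
    have hcost := pvCost_bounds bcs rcs i t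
    rw [show (if bcs.getD i ' ' == rcs.getD t ' ' then (0:Int) else 1) = pvCost bcs rcs i t from rfl]
    set cur2 := (if (i:Int) - (t:Int) + 1 ≤ mad then
        (if pvLtPair (m, (i:Int) - (t:Int) + 1) (cur.getD t pvINF) = true
         then cur.set t (m, (i:Int) - (t:Int) + 1) else cur)
      else cur) with hcur2
    have hcur2len : cur2.length = rcs.length + 1 := by
      rw [hcur2]; split_ifs <;> simp [List.length_set, hlen]
    have hcur2ne : ∀ k, k ≠ t → cur2.getD k pvINF = cur.getD k pvINF := by
      intro k hk
      rw [hcur2]; split_ifs <;> first | rfl | rw [pvGetD_set_ne _ _ _ _ _ (by omega)]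
    have hcur2t : cur2.getD t pvINF = pvToPair (i+1) t (pvSpec bcs rcs mam mad (i+1) t) := by
      rw [pvSpec_succ]
      have hdel : pvDelO bcs rcs mam mad i t = (if (i:Int) - (t:Int) + 1 ≤ mad then some m else none) := by
        unfold pvDelO; rw [hS]
      rw [hcur2, hdel]
      by_cases hd : (i:Int) - (t:Int) + 1 ≤ mad
      · rw [if_pos hd, if_pos hd]
        cases hM : pvMatO bcs rcs mam mad i t with
        | none =>
          rw [hcurt, hM]
          rw [if_pos (by simp [pvLtPair, pvToPair, pvINF] <;> omega)]
          rw [pvGetD_set_self _ _ _ _ (by rw [hlen]; omega)]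
          simp only [pvMinO, pvToPair]
          congr 1
          push_cast; ring
        | some m2 =>
          rw [hcurt, hM]
          simp only [pvToPair]
          by_cases hlt : m < m2
          · rw [if_pos (by simp [pvLtPair] <;> push_cast <;> omega)]
            rw [pvGetD_set_self _ _ _ _ (by rw [hlen]; omega)]
            simp only [pvMinO, pvToPair]
            have hmin : min m m2 = m := by omega
            rw [hmin]
            congr 1
            push_cast; ring
          · rw [if_neg (by simp [pvLtPair] <;> push_cast <;> omega)]
            rw [hcurt, hM]
            simp only [pvMinO, pvToPair]
            have hmin : min m m2 = m2 := by omega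
            rw [hmin]
      · rw [if_neg hd, if_neg hd]
        rw [hcurt]
        cases hM : pvMatO bcs rcs mam mad i t <;> rfl
    rcases Nat.lt_trichotomy j t with hlt | heq | hgt
    · -- j < t : untouched, already final
      conv_rhs => rw [if_pos (show j < t+1 by omega)]
      have key : ∀ (w : Int × Int) (res : List (Int × Int)),
          (res = cur2.set (t+1) w ∨ res = cur2) →
          res.getD j pvINF = pvToPair (i+1) j (pvSpec bcs rcs mam mad (i+1) j) := by
        intro w res hres
        have hr : res.getD j pvINF = cur2.getD j pvINF := by
          rcases hres with h' | h' <;> subst h'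
          · rw [pvGetD_set_ne _ _ _ _ _ (by omega)]
          · rfl
        rw [hr, hcur2ne j (by omega), hcur j hj, if_pos (by omega)]
      split_ifs <;> first | exact key _ _ (Or.inl rfl) | exact key (0, 0) _ (Or.inr rfl)
    · -- j = t : the deletion update finished this cell
      subst heq
      conv_rhs => rw [if_pos (show j < j+1 by omega)]
      have key : ∀ (w : Int × Int) (res : List (Int × Int)),
          (res = cur2.set (j+1) w ∨ res = cur2) →
          res.getD j pvINF = pvToPair (i+1) j (pvSpec bcs rcs mam mad (i+1) j) := by
        intro w res hres
        have hr : res.getD j pvINF = cur2.getD j pvINF := by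
          rcases hres with h' | h' <;> subst h'
          · rw [pvGetD_set_ne _ _ _ _ _ (by omega)]
          · rfl
        rw [hr, hcur2t]
      split_ifs <;> first | exact key _ _ (Or.inl rfl) | exact key (0, 0) _ (Or.inr rfl)
    · -- j > t
      by_cases hj1 : j = t+1
      · -- j = t+1 : exactly the match candidate has been applied
        subst hj1
        conv_rhs => rw [if_neg (show ¬ (t+1 < t+1) by omega), if_pos rfl]
        have htR : t < rcs.length := by omega
        rw [if_pos htR]
        have hMat : pvMatO bcs rcs mam mad i (t+1) =
            (if m + pvCost bcs rcs i t ≤ mam then some (m + pvCost bcs rcs i t) else none) := by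
          unfold pvMatO
          rw [if_pos (by omega)]
          simp only [Nat.add_sub_cancel, hS]
        rw [hMat]
        have hread : cur2.getD (t+1) pvINF = pvINF := by
          rw [hcur2ne _ (by omega), hcur _ (by omega), if_neg (by omega), if_neg (by omega)]
        by_cases hc4 : m + pvCost bcs rcs i t ≤ mam
        · rw [if_pos hc4, if_pos hc4, hread]
          rw [if_pos (by simp [pvLtPair, pvINF] <;> omega)]
          rw [pvGetD_set_self _ _ _ _ (by rw [hcur2len]; omega)]
          simp only [pvToPair]
          congr 1
          push_cast; ring
        · rw [if_neg hc4, if_neg hc4, hread]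
          rfl
      · -- j > t+1 : still INF
        conv_rhs => rw [if_neg (show ¬ (j < t+1) by omega), if_neg hj1]
        have key : ∀ (w : Int × Int) (res : List (Int × Int)),
            (res = cur2.set (t+1) w ∨ res = cur2) →
            res.getD j pvINF = pvINF := by
          intro w res hres
          have hr : res.getD j pvINF = cur2.getD j pvINF := by
            rcases hres with h' | h' <;> subst h'
            · rw [pvGetD_set_ne _ _ _ _ _ (by omega)]
            · rfl
          rw [hr, hcur2ne _ (by omega), hcur _ hj, if_neg (by omega), if_neg (by omega)]
        split_ifs <;> first | exact key _ _ (Or.inl rfl) | exact key (0, 0) _ (Or.inr rfl)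

theorem pvCellA_fold_inv (bcs rcs : List Char) (mam mad : Int) (hmam : mam < 1000000000)
    (i : Nat) (prev : List (Int × Int))
    (hprev : ∀ j, j ≤ rcs.length → prev.getD j pvINF = pvToPair i j (pvSpec bcs rcs mam mad i j)) :
    ∀ (n t : Nat) (cur : List (Int × Int)), t + n = rcs.length + 1 →
    cur.length = rcs.length + 1 →
    (∀ j, j ≤ rcs.length → cur.getD j pvINF =
      if j < t then pvToPair (i+1) j (pvSpec bcs rcs mam mad (i+1) j)
      else if j = t then pvToPair (i+1) j (pvMatO bcs rcs mam mad i j) else pvINF) →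
    ∀ j, j ≤ rcs.length →
      ((List.range' t n).foldl (pvCellA bcs rcs mam mad i prev) cur).getD j pvINF =
        pvToPair (i+1) j (pvSpec bcs rcs mam mad (i+1) j) := by
  intro n
  induction n with
  | zero =>
    intro t cur htn _ hcur j hj
    rw [show List.range' t 0 = [] from rfl, List.foldl_nil, hcur j hj, if_pos (by omega)]
  | succ n ih =>
    intro t cur htn hlen hcur j hj
    rw [List.range'_succ, List.foldl_cons]
    exact ih (t+1) (pvCellA bcs rcs mam mad i prev cur t) (by omega)
      (by rw [pvCellA_length, hlen])
      (pvCellA_step_inv bcs rcs mam mad hmam i t prev cur (by omega) hlen hprev hcur) j hj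

-- row characterisation: A's row i stores pvSpec painted as pairs
theorem pvRowA_getD (bcs rcs : List Char) (mam mad : Int) (hmam : mam < 1000000000)
    (i : Nat) : ∀ j, j ≤ rcs.length →
    (pvRowA bcs rcs mam mad i).getD j pvINF = pvToPair i j (pvSpec bcs rcs mam mad i j) := by
  induction i with
  | zero =>
    intro j hj
    unfold pvRowA
    cases j with
    | zero =>
      rw [pvGetD_set_self _ _ _ _ (by simp)]
      rfl
    | succ j =>
      rw [pvGetD_set_ne _ _ _ _ _ (by omega)]
      rw [show pvSpec bcs rcs mam mad 0 (j+1) = none from by simp [pvSpec]]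
      have hc : j < rcs.length := by omega
      simp [List.getD_eq_getElem?_getD, List.getElem?_replicate, hc, pvToPair]
  | succ i ih =>
    intro j hj
    unfold pvRowA
    rw [List.range_eq_range']
    refine pvCellA_fold_inv bcs rcs mam mad hmam i _ ih (rcs.length + 1) 0 _ (by omega)
      (by simp) ?_ j hj
    intro j' hj'
    rw [if_neg (by omega)]
    by_cases hz : j' = 0
    · subst hz
      rw [if_pos rfl]
      rw [show pvMatO bcs rcs mam mad i 0 = none from by unfold pvMatO; rw [if_neg (by omega)]]
      simp [List.getD_eq_getElem?_getD, List.getElem?_replicate, pvToPair]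
    · rw [if_neg hz]
      have hc : j' < rcs.length + 1 := by omega
      simp [List.getD_eq_getElem?_getD, List.getElem?_replicate, hc]

-- generic small fold lemmas
theorem pvFoldl_id {σ α : Type} (f : σ → α → σ) (l : List α)
    (hid : ∀ x ∈ l, ∀ st, f st x = st) : ∀ st, l.foldl f st = st := by
  induction l with
  | nil => intro st; rfl
  | cons x xs ih =>
    intro st
    rw [List.foldl_cons, hid x (by simp), ih (fun y hy st => hid y (by simp [hy]) st)]

theorem pvFoldl_rel {σ τ α : Type} (R : σ → τ → Prop) (f : σ → α → σ) (g : τ → α → τ)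
    (l : List α) (hstep : ∀ x ∈ l, ∀ s t, R s t → R (f s x) (g t x)) :
    ∀ s t, R s t → R (l.foldl f s) (l.foldl g t) := by
  induction l with
  | nil => intro s t h; exact h
  | cons x xs ih =>
    intro s t h
    rw [List.foldl_cons, List.foldl_cons]
    exact ih (fun y hy s t h => hstep y (by simp [hy]) s t h) _ _ (hstep x (by simp) s t h)

theorem pvFoldl_append_map {α β : Type} (g : β → α) :
    ∀ (l : List β) (init : List α),
      l.foldl (fun acc k => acc ++ [g k]) init = init ++ l.map g := by
  intro l
  induction l with
  | nil => intro init; simp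
  | cons x xs ih => intro init; simp [ih]

-- the outer loop of A: row k of the final table is pvRowA k
theorem pvTableA_inv (bcs rcs : List Char) (mam mad : Int) :
    ∀ (n t : Nat) (DP : List (List (Int × Int))), t + n = bcs.length →
    DP.length = bcs.length + 1 →
    (∀ k, k ≤ bcs.length → DP.getD k [] =
      (if k ≤ t then pvRowA bcs rcs mam mad k else List.replicate (rcs.length+1) pvINF)) →
    ∀ k, k ≤ bcs.length →
      ((List.range' t n).foldl
        (fun DP i => (List.range (rcs.length+1)).foldl (pvBodyA bcs rcs mam mad i) DP) DP).getD k []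
      = (if k ≤ t + n then pvRowA bcs rcs mam mad k else List.replicate (rcs.length+1) pvINF) := by
  intro n
  induction n with
  | zero =>
    intro t DP _ _ hDP k hk
    rw [show List.range' t 0 = [] from rfl, List.foldl_nil, hDP k hk]
    simp
  | succ n ih =>
    intro t DP htn hlen hDP k hk
    rw [List.range'_succ, List.foldl_cons]
    rw [pvBodyA_sim bcs rcs mam mad t _ DP (by omega)]
    have hget_t : DP.getD t [] = pvRowA bcs rcs mam mad t := by
      rw [hDP t (by omega), if_pos (le_refl t)]
    have hget_t1 : DP.getD (t+1) [] = List.replicate (rcs.length+1) pvINF := by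
      rw [hDP (t+1) (by omega), if_neg (by omega)]
    have hrow : (List.range (rcs.length+1)).foldl
        (pvCellA bcs rcs mam mad t (DP.getD t [])) (DP.getD (t+1) [])
        = pvRowA bcs rcs mam mad (t+1) := by
      rw [hget_t, hget_t1]
      rfl
    rw [hrow]
    have h1 : (DP.set (t+1) (pvRowA bcs rcs mam mad (t+1))).length = bcs.length + 1 := by
      rw [List.length_set, hlen]
    have h2 : t + 1 + n = bcs.length := by omega
    have h3 : t + 1 + n = t + (n + 1) := by omega
    rw [← h3]
    refine ih (t+1) (DP.set (t+1) (pvRowA bcs rcs mam mad (t+1))) h2 h1 ?_ k hk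
    intro k' hk'
    by_cases he : k' = t+1
    · subst he
      rw [pvGetD_set_self _ _ _ _ (by simp only [List.length_set, hlen]; omega), if_pos (le_refl _)]
    · rw [pvGetD_set_ne _ _ _ _ _ (fun h => he h.symm), hDP k' hk']
      by_cases hle : k' ≤ t
      · rw [if_pos hle, if_pos (by omega)]
      · rw [if_neg hle, if_neg (by omega)]

-- B's cell computation produces pvSpec at the next row inside the new band
theorem pvCandB_spec (bcs rcs : List Char) (mam mad : Int) (hmam : 0 ≤ mam) (hmad : 0 ≤ mad)
    (i : Nat) (lo : Int) (row : List (Option Int))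
    (hlo : lo = max 0 ((i : Int) - mad))
    (hlen : ((row.length : Int)) = max 0 (min (i : Int) ((rcs.length : Int)) + 1 - lo))
    (hrow : ∀ k, k < row.length → row.getD k none = pvSpec bcs rcs mam mad i (lo.toNat + k))
    (j : Int) (hj1 : max 0 ((i : Int) + 1 - mad) ≤ j)
    (hj2 : j ≤ min ((i : Int) + 1) ((rcs.length : Int))) :
    pvCandB bcs rcs mam i lo row j = pvSpec bcs rcs mam mad (i+1) j.toNat := by
  have hlo0 : 0 ≤ lo := by omega
  have hj0 : 0 ≤ j := by omega
  have haccess : ∀ (x : Int), 0 ≤ x →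
      (if lo ≤ x ∧ x < lo + (row.length : Int) then row.getD (x - lo).toNat none else none)
        = pvSpec bcs rcs mam mad i x.toNat := by
    intro x hx
    by_cases hin : lo ≤ x ∧ x < lo + (row.length : Int)
    · rw [if_pos hin]
      rw [hrow (x - lo).toNat (by omega)]
      congr 1
      omega
    · rw [if_neg hin]
      cases hS : pvSpec bcs rcs mam mad i x.toNat with
      | none => rfl
      | some m =>
        obtain ⟨hb1, hb2, hb3, _, _⟩ := pvSpec_bounds bcs rcs mam mad i x.toNat m hS
        exfalso
        omega
  unfold pvCandB
  dsimp only
  rw [haccess j hj0]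
  rw [pvSpec_succ]
  have hdel : pvDelO bcs rcs mam mad i j.toNat = pvSpec bcs rcs mam mad i j.toNat := by
    unfold pvDelO; rw [if_pos (by omega)]
  rw [hdel]
  by_cases hjpos : (1:Int) ≤ j
  · -- j ≥ 1 : the match candidate is live
    have hmat : pvMatO bcs rcs mam mad i j.toNat =
        (match pvSpec bcs rcs mam mad i (j.toNat - 1) with
         | none => none
         | some m => if m + pvCost bcs rcs i (j.toNat - 1) ≤ mam
             then some (m + pvCost bcs rcs i (j.toNat - 1)) else none) := by
      unfold pvMatO
      rw [if_pos (by constructor <;> omega)]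
    rw [hmat]
    have hacc1 := haccess (j-1) (by omega)
    by_cases hin : lo ≤ j - 1 ∧ j - 1 < lo + (row.length : Int)
    · rw [if_pos hin]
      rw [if_pos hin] at hacc1
      have hidx : (j-1).toNat = j.toNat - 1 := by omega
      rw [hidx] at hacc1
      rw [hacc1]
      cases hS : pvSpec bcs rcs mam mad i (j.toNat - 1) with
      | none => cases pvSpec bcs rcs mam mad i j.toNat <;> rfl
      | some v =>
        dsimp only
        have hcosteq : (if bcs.getD i ' ' == rcs.getD (j-1).toNat ' ' then (0:Int) else 1)
            = pvCost bcs rcs i (j.toNat - 1) := by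
          unfold pvCost
          rw [hidx]
        rw [hcosteq]
        by_cases hc : v + pvCost bcs rcs i (j.toNat - 1) ≤ mam
        · rw [if_pos hc, if_pos hc]
          cases hS0 : pvSpec bcs rcs mam mad i j.toNat with
          | none => rfl
          | some cv =>
            dsimp only
            by_cases hlt : v + pvCost bcs rcs i (j.toNat - 1) < cv
            · rw [if_pos hlt]
              simp [pvMinO]
              omega
            · rw [if_neg hlt]
              simp [pvMinO]
              omega
        · rw [if_neg hc, if_neg hc]
          cases pvSpec bcs rcs mam mad i j.toNat <;> rfl
    · rw [if_neg hin]
      rw [if_neg hin] at hacc1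
      have : pvSpec bcs rcs mam mad i (j.toNat - 1) = none := by
        rw [show j.toNat - 1 = (j-1).toNat from by omega, ← hacc1]
      rw [this]
      cases pvSpec bcs rcs mam mad i j.toNat <;> rfl
  · -- j = 0 : no match predecessor
    have hj00 : j = 0 := by omega
    subst hj00
    rw [if_neg (by omega)]
    have hmat : pvMatO bcs rcs mam mad i (0:Int).toNat = none := by
      unfold pvMatO; rw [if_neg (by omega)]
    rw [hmat]
    cases pvSpec bcs rcs mam mad i (0:Int).toNat <;> rfl

-- the invariant carried by B's outer loop
def pvStInv (bcs rcs : List Char) (mam mad : Int) (i : Nat) (st : Int × List (Option Int)) : Prop :=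
  st.1 = max 0 ((i:Int) - mad) ∧
  ((st.2.length : Int)) = max 0 (min (i:Int) ((rcs.length : Int)) + 1 - st.1) ∧
  (∀ k, k < st.2.length → st.2.getD k none = pvSpec bcs rcs mam mad i (st.1.toNat + k))

theorem pvStepB_inv (bcs rcs : List Char) (mam mad : Int) (hmam : 0 ≤ mam) (hmad : 0 ≤ mad)
    (i : Nat) (st : Int × List (Option Int)) (h : pvStInv bcs rcs mam mad i st) :
    pvStInv bcs rcs mam mad (i+1) (pvStepB bcs rcs mam mad st i) := by
  obtain ⟨h1, h2, h3⟩ := h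
  unfold pvStepB
  dsimp only
  rw [pvFoldl_append_map (fun k : Nat =>
        pvCandB bcs rcs mam i st.1 st.2 (max 0 ((i:Int) + 1 - mad) + (k : Int))), List.nil_append]
  refine ⟨by dsimp only; push_cast; ring_nf, ?_, ?_⟩
  · dsimp only
    rw [List.length_map, List.length_range]
    push_cast
    omega
  · dsimp only
    intro k hk
    rw [List.length_map, List.length_range] at hk
    rw [List.getD_eq_getElem?_getD, List.getElem?_map, List.getElem?_range hk]
    dsimp only [Option.map_some, Option.getD_some]
    rw [pvCandB_spec bcs rcs mam mad hmam hmad i st.1 st.2 h1 h2 h3 _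
      (by omega) (by omega)]
    congr 1
    omega

theorem pvRowB_inv (bcs rcs : List Char) (mam mad : Int) (hmam : 0 ≤ mam) (hmad : 0 ≤ mad) :
    ∀ (n t : Nat) (st : Int × List (Option Int)), pvStInv bcs rcs mam mad t st →
      pvStInv bcs rcs mam mad (t+n) ((List.range' t n).foldl (pvStepB bcs rcs mam mad) st) := by
  intro n
  induction n with
  | zero => intro t st h; exact h
  | succ n ih =>
    intro t st h
    rw [List.range'_succ, List.foldl_cons]
    have := ih (t+1) _ (pvStepB_inv bcs rcs mam mad hmam hmad t st h)
    rwa [show t + 1 + n = t + (n+1) from by omega] at this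

-- a column whose final cell is unreachable (or fails the filter) leaves A's selection state alone
theorem pvSelA_id_of_none (bcs rcs : List Char) (mam mad : Int) (hmam9 : mam < 1000000000)
    (j : Nat) (hjR : j ≤ rcs.length)
    (hS : pvSpec bcs rcs mam mad bcs.length j = none) :
    ∀ st, pvSelA mam mad (pvRowA bcs rcs mam mad bcs.length) st j = st := by
  intro st
  unfold pvSelA
  dsimp only
  rw [pvRowA_getD bcs rcs mam mad hmam9 bcs.length j hjR, hS]
  rw [if_neg (by simp [pvToPair, pvINF]; omega)]

-- with a negative threshold the filter rejects every cell, so A selects nothing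
theorem pvSelA_neg (bcs rcs : List Char) (mam mad : Int) (hmam9 : mam < 1000000000)
    (hneg : mam < 0 ∨ mad < 0) :
    (List.range (rcs.length+1)).foldl (pvSelA mam mad (pvRowA bcs rcs mam mad bcs.length)) none
      = none := by
  apply pvFoldl_id
  intro j hj st
  have hjR : j ≤ rcs.length := by simp [List.mem_range] at hj; omega
  unfold pvSelA
  dsimp only
  rw [pvRowA_getD bcs rcs mam mad hmam9 bcs.length j hjR]
  cases hS : pvSpec bcs rcs mam mad bcs.length j with
  | none => rw [if_neg (by simp [pvToPair, pvINF]; omega)]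
  | some m =>
    obtain ⟨hb1, _, _, hb4, _⟩ := pvSpec_bounds bcs rcs mam mad bcs.length j m hS
    rw [if_neg ?_]
    simp only [pvToPair]
    omega

-- the relation carried through both selection loops
def pvRel (Bn : Int) (a : Option (Int × Int × Int)) (b : Option (Int × Int)) : Prop :=
  match a, b with
  | none, none => True
  | some av, some bv => av.1 = bv.2 ∧ av.2.1 = bv.1 ∧ av.2.2 = Bn - av.1
  | _, _ => False

theorem pvSel_step (bcs rcs : List Char) (mam mad : Int)
    (hmam : 0 ≤ mam) (hmad : 0 ≤ mad) (hmam9 : mam < 1000000000)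
    (lo : Int) (row : List (Option Int)) (hlo0 : 0 ≤ lo)
    (hlen : ((row.length : Int)) = max 0 (min ((bcs.length : Int)) ((rcs.length : Int)) + 1 - lo))
    (hrow : ∀ k, k < row.length → row.getD k none = pvSpec bcs rcs mam mad bcs.length (lo.toNat + k))
    (k : Nat) (hk : k < row.length) :
    ∀ a b, pvRel (bcs.length : Int) a b →
      pvRel (bcs.length : Int)
        (pvSelA mam mad (pvRowA bcs rcs mam mad bcs.length) a (lo.toNat + k))
        (pvSelB lo row b k) := by
  intro a b hab
  have hjR : lo.toNat + k ≤ rcs.length := by omega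
  have hjB : ((lo.toNat + k : Nat) : Int) = lo + (k : Int) := by omega
  unfold pvSelA pvSelB
  dsimp only
  rw [pvRowA_getD bcs rcs mam mad hmam9 bcs.length _ hjR, hrow k hk]
  cases hS : pvSpec bcs rcs mam mad bcs.length (lo.toNat + k) with
  | none =>
    rw [if_neg (by simp [pvToPair, pvINF]; omega)]
    exact hab
  | some m =>
    obtain ⟨hb1, hb2, hb3, hb4, hb5⟩ := pvSpec_bounds bcs rcs mam mad bcs.length _ _ hS
    rw [if_pos (by simp only [pvToPair]; omega)]
    simp only [pvToPair]
    cases a with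
    | none =>
      cases b with
      | none =>
        unfold pvRel
        exact ⟨by omega, rfl, rfl⟩
      | some bv => exact absurd hab (by simp [pvRel])
    | some av =>
      cases b with
      | none => exact absurd hab (by simp [pvRel])
      | some bv =>
        obtain ⟨e1, e2, e3⟩ := hab
        dsimp only
        have hiff : (pvLt3 (m, (bcs.length : Int) - ((lo.toNat + k : Nat) : Int), ((lo.toNat + k : Nat) : Int))
            (av.2.1, av.2.2, av.1) = true)
            ↔ (m < bv.1 ∨ (m = bv.1 ∧ lo + (k : Int) > bv.2)) := by
          simp [pvLt3, pvLtPair]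
          omega
        by_cases hc : m < bv.1 ∨ (m = bv.1 ∧ lo + (k : Int) > bv.2)
        · rw [if_pos (hiff.mpr hc), if_pos hc]
          exact ⟨by omega, rfl, rfl⟩
        · rw [if_neg (fun hh => hc (hiff.mp hh)), if_neg hc]
          exact ⟨e1, e2, e3⟩

-- ===== VERDICT (by name: the statement is the Claim_ definition above) =====
-- spec is empty outside the final band (used to discharge A's prefix/suffix selection columns)
theorem pvSpec_outside (bcs rcs : List Char) (mam mad : Int) (hmad : 0 ≤ mad) (j : Nat)
    (hout : ((j : Int)) < max 0 ((bcs.length : Int) - mad) ∨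
            min ((bcs.length : Int)) ((rcs.length : Int)) < (j : Int)) :
    pvSpec bcs rcs mam mad bcs.length j = none := by
  cases hS : pvSpec bcs rcs mam mad bcs.length j with
  | none => rfl
  | some m =>
    obtain ⟨hb1, hb2, hb3, _, _⟩ := pvSpec_bounds bcs rcs mam mad bcs.length j m hS
    exfalso
    omega

theorem match_barcode_at_5prime_spec : Claim_equal_match_barcode_at_5prime := by
  unfold Claim_equal_match_barcode_at_5prime
  intro rs bs mam mad hdom hpre
  unfold Pre_match_barcode_at_5prime at hpre
  unfold Spec_match_barcode_at_5prime
  unfold match_barcode_at_5prime match_barcode_at_5prime_alt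
  dsimp only
  set bcs := bs.toList with hbcs
  set rcs := rs.toList with hrcs
  have hrowA : ((List.range bcs.length).foldl
      (fun DP i => (List.range (rcs.length+1)).foldl (pvBodyA bcs rcs mam mad i) DP)
      ((List.replicate (bcs.length+1) (List.replicate (rcs.length+1) pvINF)).set 0
        ((List.replicate (rcs.length+1) pvINF).set 0 ((0:Int),(0:Int))))).getD bcs.length []
      = pvRowA bcs rcs mam mad bcs.length := by
    rw [show List.range bcs.length = List.range' 0 bcs.length from List.range_eq_range']
    have h0 : ∀ k, k ≤ bcs.length →
        ((List.replicate (bcs.length+1) (List.replicate (rcs.length+1) pvINF)).set 0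
          ((List.replicate (rcs.length+1) pvINF).set 0 ((0:Int),(0:Int)))).getD k []
        = if k ≤ 0 then pvRowA bcs rcs mam mad k else List.replicate (rcs.length+1) pvINF := by
      intro k hk
      cases k with
      | zero =>
        rw [pvGetD_set_self _ _ _ _ (by simp), if_pos (le_refl 0)]
        rfl
      | succ k =>
        rw [pvGetD_set_ne _ _ _ _ _ (by omega), if_neg (by omega)]
        have hc : k+1 < bcs.length + 1 := by omega
        simp [List.getD_eq_getElem?_getD, List.getElem?_replicate, hc]
    have := pvTableA_inv bcs rcs mam mad bcs.length 0 _ (by omega)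
      (by simp) h0 bcs.length (le_refl _)
    rw [this, if_pos (by omega)]
  rw [hrowA]
  by_cases hneg : mam < 0 ∨ mad < 0
  · rw [if_pos hneg, pvSelA_neg bcs rcs mam mad hpre hneg]
  · rw [if_neg hneg]
    have hmam : 0 ≤ mam := by omega
    have hmad : 0 ≤ mad := by omega
    rw [List.range_eq_range' (n := bcs.length)]
    set st := (List.range' 0 bcs.length).foldl (pvStepB bcs rcs mam mad) ((0:Int), [some (0:Int)]) with hstdef
    have hst : pvStInv bcs rcs mam mad bcs.length st := by
      have h00 : pvStInv bcs rcs mam mad 0 ((0:Int), [some (0:Int)]) := by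
        unfold pvStInv
        refine ⟨by simp <;> omega, by simp <;> omega, ?_⟩
        intro k hk
        simp only [List.length_cons, List.length_nil] at hk
        have : k = 0 := by omega
        subst this
        simp [pvSpec]
      have := pvRowB_inv bcs rcs mam mad hmam hmad bcs.length 0 _ h00
      rwa [Nat.zero_add] at this
    obtain ⟨g1, g2, g3⟩ := hst
    by_cases hempty : st.2.length = 0
    · rw [hempty]
      have hAnone : (List.range (rcs.length+1)).foldl
          (pvSelA mam mad (pvRowA bcs rcs mam mad bcs.length)) none = none := by
        apply pvFoldl_id
        intro j hj st'
        have hjR : j ≤ rcs.length := by simp [List.mem_range] at hj; omega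
        refine pvSelA_id_of_none bcs rcs mam mad hpre j hjR ?_ st'
        apply pvSpec_outside bcs rcs mam mad hmad
        omega
      rw [hAnone]
      rfl
    · have hlo0 : 0 ≤ st.1 := by omega
      have hbound : st.1.toNat + st.2.length ≤ rcs.length + 1 := by omega
      have hsplit : List.range (rcs.length + 1) =
          List.range' 0 st.1.toNat ++ List.range' st.1.toNat st.2.length ++
          List.range' (st.1.toNat + st.2.length) ((rcs.length + 1) - st.1.toNat - st.2.length) := by
        rw [List.range_eq_range']
        have h5 : rcs.length + 1 =
            st.1.toNat + (st.2.length + ((rcs.length + 1) - st.1.toNat - st.2.length)) := by omega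
        rw [h5, ← List.range'_append, ← List.range'_append]
        norm_num
      rw [hsplit, List.foldl_append, List.foldl_append]
      have hpre0 : (List.range' 0 st.1.toNat).foldl
          (pvSelA mam mad (pvRowA bcs rcs mam mad bcs.length)) none = none := by
        apply pvFoldl_id
        intro j hj st'
        rw [List.mem_range'_1] at hj
        refine pvSelA_id_of_none bcs rcs mam mad hpre j (by omega) ?_ st'
        apply pvSpec_outside bcs rcs mam mad hmad
        omega
      rw [hpre0]
      have hmid : pvRel (bcs.length : Int)
          ((List.range' st.1.toNat st.2.length).foldl
            (pvSelA mam mad (pvRowA bcs rcs mam mad bcs.length)) none)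
          ((List.range st.2.length).foldl (pvSelB st.1 st.2) none) := by
        rw [List.range'_eq_map_range, List.foldl_map]
        exact pvFoldl_rel (pvRel (bcs.length : Int)) _ _ (List.range st.2.length)
          (fun x hx a b hab => pvSel_step bcs rcs mam mad hmam hmad hpre st.1 st.2 hlo0 g2 g3
            x (by simpa [List.mem_range] using hx) a b hab) none none trivial
      have hsuf : ∀ res, (List.range' (st.1.toNat + st.2.length)
          ((rcs.length + 1) - st.1.toNat - st.2.length)).foldl
          (pvSelA mam mad (pvRowA bcs rcs mam mad bcs.length)) res = res := by
        intro res
        apply pvFoldl_id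
        intro j hj st'
        rw [List.mem_range'_1] at hj
        refine pvSelA_id_of_none bcs rcs mam mad hpre j (by omega) ?_ st'
        apply pvSpec_outside bcs rcs mam mad hmad
        omega
      rw [hsuf]
      revert hmid
      cases hA : (List.range' st.1.toNat st.2.length).foldl
          (pvSelA mam mad (pvRowA bcs rcs mam mad bcs.length)) none with
      | none =>
        cases hB : (List.range st.2.length).foldl (pvSelB st.1 st.2) none with
        | none => intro _; rfl
        | some bv => intro h; exact absurd h (by simp [pvRel])
      | some av =>
        cases hB : (List.range st.2.length).foldl (pvSelB st.1 st.2) none with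
        | none => intro h; exact absurd h (by simp [pvRel])
        | some bv =>
          obtain ⟨av1, av2, av3⟩ := av
          obtain ⟨bv1, bv2⟩ := bv
          intro h
          obtain ⟨e1, e2, e3⟩ := h
          dsimp only at e1 e2 e3 ⊢
          rw [e1, e2]
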